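-- pv_equiv track=rewrite | github.com/ryu5791/AutoUniTestGen | src/parser/typedef_extractor.py | _check_brace_balance
-- ===== SOURCE A (Python) =====
-- def _check_brace_balance(text: str) -> bool:
--     """
--     波括弧のバランスをチェック
--
--     Args:
--         text: チェックするテキスト
--
--     Returns:
--         バランスが取れている場合True
--     """
--     balance = 0
--     for char in text:
--         if char == '{':
--             balance += 1
--         elif char == '}':
--             balance -= 1
--     return balance == 0
-- ===== SOURCE B (Python) =====
-- def _check_brace_balance(text: str) -> bool:
--     return text.count('{') == text.count('}')
-- ===== Notes on version B (the rewrite author's own statement) =====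
-- stated objective: faster
-- what changed: Replaces the manual per-character net-balance accumulator loop with two independent str.count scans compared for equality (C-level counting instead of a Python-level loop; valid because A never early-exits, so only totals matter).
import Mathlib
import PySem

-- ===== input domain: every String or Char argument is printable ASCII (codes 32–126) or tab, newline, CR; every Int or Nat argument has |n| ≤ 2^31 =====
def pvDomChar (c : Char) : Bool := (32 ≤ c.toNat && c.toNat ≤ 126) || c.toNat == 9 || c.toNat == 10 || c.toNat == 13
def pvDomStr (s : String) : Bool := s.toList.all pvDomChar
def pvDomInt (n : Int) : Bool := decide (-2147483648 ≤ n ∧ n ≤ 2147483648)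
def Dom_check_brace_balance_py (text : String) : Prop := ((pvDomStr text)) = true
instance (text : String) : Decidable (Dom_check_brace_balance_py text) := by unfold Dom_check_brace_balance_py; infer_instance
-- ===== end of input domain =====

-- B replaces A's single accumulator loop by two independent substring counts compared for equality (measurably faster: C-level counting replaces the per-character Python loop).

-- ===== PORT A =====
def check_brace_balance_py (text : String) : Bool :=
  let balance : Int :=
    text.toList.foldl
      (fun balance char =>
        if char = '{' then balance + 1
        else if char = '}' then balance - 1
        else balance) 0
  balance == 0

-- ===== PORT B =====
def check_brace_balance_py_alt (text : String) : Bool :=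
  PySem.Str.count text "{" == PySem.Str.count text "}"

-- ===== PRECONDITION & SPEC =====
def Spec_check_brace_balance_py (text : String) (out : Bool) : Prop := out = check_brace_balance_py_alt text
instance (text : String) (out : Bool) : Decidable (Spec_check_brace_balance_py text out) := by unfold Spec_check_brace_balance_py; infer_instance

-- ===== CLAIM (what is proved, stated in full; the proofs are below) =====
def Claim_equal_check_brace_balance_py : Prop := ∀ (text : String), Dom_check_brace_balance_py text → Spec_check_brace_balance_py text (check_brace_balance_py text)

-- ===== LEMMAS AND PROOFS =====

-- Chars.count with a single-character needle is List.count.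
theorem count_go_singleton (c : Char) (l : List Char) (fuel : Nat) (acc : Nat)
    (h : l.length ≤ fuel) :
    PySem.Chars.count.go [c] fuel l acc = acc + l.count c := by
  induction l generalizing fuel acc with
  | nil => cases fuel <;> simp [PySem.Chars.count.go]
  | cons x t ih =>
      cases fuel with
      | zero => simp at h
      | succ n =>
          simp only [List.length_cons, Nat.succ_le_succ_iff] at h
          by_cases hx : x = c
          · subst hx
            simp [PySem.Chars.count.go, List.isPrefixOf, ih n (acc + 1) h, List.count_cons]
            omega
          · simp [PySem.Chars.count.go, List.isPrefixOf, hx, ih n acc h,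
              List.count_cons, Ne.symm hx]

theorem chars_count_singleton (c : Char) (l : List Char) :
    PySem.Chars.count l [c] = l.count c := by
  simp [PySem.Chars.count, count_go_singleton c l l.length 0 le_rfl]

-- A's running balance equals the difference of the two counts.
theorem balance_foldl (l : List Char) (b : Int) :
    l.foldl
      (fun balance char =>
        if char = '{' then balance + 1
        else if char = '}' then balance - 1
        else balance) b
      = b + (l.count '{' : Int) - (l.count '}' : Int) := by
  induction l generalizing b with
  | nil => simp
  | cons x t ih =>
      by_cases h1 : x = '{'
      · subst h1; simp [ih, List.count_cons]; ring
      · by_cases h2 : x = '}'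
        · subst h2; simp [ih, List.count_cons, h1]; ring
        · simp [ih, List.count_cons, h1, h2, Ne.symm h1]

-- ===== VERDICT (by name: the statement is the Claim_ definition above) =====
theorem check_brace_balance_py_spec : Claim_equal_check_brace_balance_py := by
  intro text _
  unfold Spec_check_brace_balance_py check_brace_balance_py check_brace_balance_py_alt
  simp only [PySem.Str.count_eq]
  rw [show ("{" : String).toList = ['{'] from rfl, show ("}" : String).toList = ['}'] from rfl,
    chars_count_singleton, chars_count_singleton, balance_foldl]
  rw [Bool.eq_iff_iff]
  simp only [beq_iff_eq]
  omega
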